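-- pv_equiv track=rewrite | github.com/orneryhippo/saturdays | rabbit/sat.py | check_cert
-- ===== SOURCE A (Python) =====
-- def make_ks(reverse=False):
-- 	"""ks are the bits of the ints from 0 to 7, used as truth flags
-- 	for vars in predicates. I.e. 0 means the denial of a var, 0  for var X means notX
-- 	1 for var X means X is true
-- 	"""
-- 	ks = []
-- 	for i in range(2):
-- 		for j in range(2):
-- 			for k in range(2):
-- 				if reverse:
-- 					ks.append((1-i,1-j,1-k))
-- 				else:
-- 					ks.append((i,j,k))
-- 	return ks
--
-- def ksunpack(bits):
-- 	"""takes an 8-bit number and returns a kset"""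
-- 	ks = []
-- 	_ks = make_ks()
-- 	for i in range(8):
-- 		if ((bits >> i) & 1) == 1:
-- 			ks.append(_ks[i])
-- 	return ks
--
-- def check_cert(cert,plist):
-- 	fails = []
-- 	for i,p in enumerate(plist):
-- 		s,m,l = p
-- 		ks = ksunpack(plist[p])
-- 		for k in ks:
-- 			sk,mk,lk = k
-- 			incomp = (1-sk,1-mk,1-lk)
-- 			if cert[s] == incomp[0] and cert[m] == incomp[1] and cert[l] == incomp[2]:
-- 				fails.append(p)
-- 	return fails
-- ===== SOURCE B (Python) =====
-- def check_cert(cert, plist):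
--     fails = []
--     for p in plist:
--         s, m, l = p
--         bits = plist[p]
--         vs, vm, vl = cert[s], cert[m], cert[l]
--         if vs in (0, 1) and vm in (0, 1) and vl in (0, 1):
--             idx = (1 - vs) * 4 + (1 - vm) * 2 + (1 - vl)
--             if (bits >> idx) & 1 == 1:
--                 fails.append(p)
--     return fails
-- ===== Notes on version B (the rewrite author's own statement) =====
-- stated objective: simpler
-- what changed: B drops make_ks/ksunpack entirely: instead of decoding all 8 set bits of the clause mask into truth triples and scanning them for the complement of the certificate, B notes that only one triple can ever match, checks that cert[s],cert[m],cert[l] are binary, and tests the single mask bit at index (1-cert[s])*4+(1-cert[m])*2+(1-cert[l]).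
-- outside the precondition, e.g. on check_cert({}, {('a', 'b', 'c'): 0}): A returns [], B raises KeyError
import Mathlib
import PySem

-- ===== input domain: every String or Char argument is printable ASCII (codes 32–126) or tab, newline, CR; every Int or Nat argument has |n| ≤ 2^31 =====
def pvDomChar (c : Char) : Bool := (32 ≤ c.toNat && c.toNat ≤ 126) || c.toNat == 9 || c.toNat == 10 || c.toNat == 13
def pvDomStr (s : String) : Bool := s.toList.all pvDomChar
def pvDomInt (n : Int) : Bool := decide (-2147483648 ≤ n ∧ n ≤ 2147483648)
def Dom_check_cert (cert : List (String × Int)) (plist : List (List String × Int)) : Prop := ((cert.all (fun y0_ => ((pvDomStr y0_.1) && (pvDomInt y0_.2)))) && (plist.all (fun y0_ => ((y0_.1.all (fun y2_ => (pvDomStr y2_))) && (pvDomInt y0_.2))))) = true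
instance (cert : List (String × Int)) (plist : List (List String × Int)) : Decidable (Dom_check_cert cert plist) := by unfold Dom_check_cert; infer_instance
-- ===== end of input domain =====

-- B replaces A's decode-all-8-bits-and-scan inner loop by a direct test of the single
-- relevant bit (simpler); equivalence is about the return value only (neither mutates).

-- ===== PORT A =====
def make_ks (reverse : Bool) : List (Int × Int × Int) :=
  (PySem.List.pyRange 0 2 1).foldl (fun ks i =>
    (PySem.List.pyRange 0 2 1).foldl (fun ks j =>
      (PySem.List.pyRange 0 2 1).foldl (fun ks k =>
        ks ++ [if reverse then (1-i,1-j,1-k) else (i,j,k)]) ks) ks) []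

def ksunpack (bits : Int) : List (Int × Int × Int) :=
  let _ks := make_ks false
  (PySem.List.pyRange 0 8 1).foldl (fun ks i =>
    if PySem.Int.band (bits >>> i.toNat) 1 == 1 then
      -- _ks[i]: i ∈ 0..7 and _ks has 8 elements, so the index is always in range
      ks ++ [PySem.List.pyGetD _ks i (0, 0, 0)]
    else ks) []

def check_cert (cert : List (String × Int)) (plist : List (List String × Int)) : List (List String) :=
  plist.foldl (fun fails p =>
    match p.1 with
    | [s, m, l] =>
      -- plist[p]: p is a key of plist, so the (first-match) lookup always succeeds
      let ks := ksunpack ((List.lookup p.1 plist).getD 0)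
      ks.foldl (fun fails k =>
        let incomp := (1 - k.1, 1 - k.2.1, 1 - k.2.2)
        -- cert[s] etc.: Pre_ guarantees the keys are present, so getD never defaults
        if (List.lookup s cert).getD 0 == incomp.1 && (List.lookup m cert).getD 0 == incomp.2.1 && (List.lookup l cert).getD 0 == incomp.2.2
        then fails ++ [p.1] else fails) fails
    | _ => fails) []   -- 's,m,l = p' with len(p) ≠ 3 raises ValueError: excluded by Pre_

-- ===== PORT B =====
def check_cert_alt (cert : List (String × Int)) (plist : List (List String × Int)) : List (List String) :=
  plist.foldl (fun fails p =>
    -- 's, m, l = p' (ValueError on a non-3-tuple lies outside Pre_)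
    if p.1.length == 3 then
      let s := p.1.getD 0 ""
      let m := p.1.getD 1 ""
      let l := p.1.getD 2 ""
      let bits := (List.lookup p.1 plist).getD 0   -- key present (p comes from plist)
      let vs := (List.lookup s cert).getD 0        -- present under Pre_
      let vm := (List.lookup m cert).getD 0
      let vl := (List.lookup l cert).getD 0
      if (vs == 0 || vs == 1) && (vm == 0 || vm == 1) && (vl == 0 || vl == 1) then
        let idx := (1 - vs) * 4 + (1 - vm) * 2 + (1 - vl)
        if PySem.Int.band (bits >>> idx.toNat) 1 == 1 then fails ++ [p.1] else fails
      else fails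
    else fails) []   -- unreachable under Pre_

-- ===== PRECONDITION & SPEC =====
-- Pre_ excludes clause keys that are not 3-tuples (A raises ValueError unpacking them) and
-- clauses naming a variable missing from cert: A raises KeyError on those whenever the
-- clause's low byte is nonzero (and B, which reads cert[s] unconditionally, raises always).
def Pre_check_cert (cert : List (String × Int)) (plist : List (List String × Int)) : Prop :=
  ∀ kv ∈ plist, kv.1.length = 3 ∧ ∀ x ∈ kv.1, (List.lookup x cert).isSome = true
instance (cert : List (String × Int)) (plist : List (List String × Int)) : Decidable (Pre_check_cert cert plist) := by unfold Pre_check_cert; infer_instance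

def pvWitness_check_cert : (List (String × Int)) × (List (List String × Int)) :=
  ([("a", 1), ("b", 0), ("c", 1)], [(["a", "b", "c"], 255), (["c", "c", "a"], 3)])

def Spec_check_cert (cert : List (String × Int)) (plist : List (List String × Int)) (out : List (List String)) : Prop := out = check_cert_alt cert plist
instance (cert : List (String × Int)) (plist : List (List String × Int)) (out : List (List String)) : Decidable (Spec_check_cert cert plist out) := by unfold Spec_check_cert; infer_instance

-- ===== CLAIM (what is proved, stated in full; the proofs are below) =====
def Claim_equal_check_cert : Prop := ∀ (cert : List (String × Int)) (plist : List (List String × Int)), Dom_check_cert cert plist → Pre_check_cert cert plist → Spec_check_cert cert plist (check_cert cert plist)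

-- ===== LEMMAS AND PROOFS =====

-- the 8 (index, truth-triple) pairs that make_ks/ksunpack enumerate
def ksPairs : List (Nat × (Int × Int × Int)) :=
  [(0,(0,0,0)),(1,(0,0,1)),(2,(0,1,0)),(3,(0,1,1)),(4,(1,0,0)),(5,(1,0,1)),(6,(1,1,0)),(7,(1,1,1))]

theorem ksunpack_eq (bits : Int) : ksunpack bits =
    (ksPairs.filter (fun c => PySem.Int.band (bits >>> c.1) 1 == 1)).map Prod.snd := by
  have hr : PySem.List.pyRange 0 8 1 = [0,1,2,3,4,5,6,7] := by decide
  have hks : ksunpack bits = (([0,1,2,3,4,5,6,7] : List Int).filter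
      (fun i => PySem.Int.band (bits >>> i.toNat) 1 == 1)).map
      (fun i => PySem.List.pyGetD (make_ks false) i ((0:Int),(0:Int),(0:Int))) := by
    unfold ksunpack
    rw [hr, PySem.List.foldl_append_if]
    simp
  rw [hks]
  have hF0 : PySem.List.pyGetD (make_ks false) (0:Int) ((0:Int),(0:Int),(0:Int)) = (0,0,0) := by decide
  have hF1 : PySem.List.pyGetD (make_ks false) (1:Int) ((0:Int),(0:Int),(0:Int)) = (0,0,1) := by decide
  have hF2 : PySem.List.pyGetD (make_ks false) (2:Int) ((0:Int),(0:Int),(0:Int)) = (0,1,0) := by decide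
  have hF3 : PySem.List.pyGetD (make_ks false) (3:Int) ((0:Int),(0:Int),(0:Int)) = (0,1,1) := by decide
  have hF4 : PySem.List.pyGetD (make_ks false) (4:Int) ((0:Int),(0:Int),(0:Int)) = (1,0,0) := by decide
  have hF5 : PySem.List.pyGetD (make_ks false) (5:Int) ((0:Int),(0:Int),(0:Int)) = (1,0,1) := by decide
  have hF6 : PySem.List.pyGetD (make_ks false) (6:Int) ((0:Int),(0:Int),(0:Int)) = (1,1,0) := by decide
  have hF7 : PySem.List.pyGetD (make_ks false) (7:Int) ((0:Int),(0:Int),(0:Int)) = (1,1,1) := by decide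
  have ht0 : ((0:Int)).toNat = 0 := rfl
  have ht1 : ((1:Int)).toNat = 1 := rfl
  have ht2 : ((2:Int)).toNat = 2 := rfl
  have ht3 : ((3:Int)).toNat = 3 := rfl
  have ht4 : ((4:Int)).toNat = 4 := rfl
  have ht5 : ((5:Int)).toNat = 5 := rfl
  have ht6 : ((6:Int)).toNat = 6 := rfl
  have ht7 : ((7:Int)).toNat = 7 := rfl
  simp only [ksPairs, List.filter_cons, List.filter_nil, ht0, ht1, ht2, ht3, ht4, ht5, ht6, ht7]
  simp only [apply_ite (List.map (fun i => PySem.List.pyGetD (make_ks false) i ((0:Int),(0:Int),(0:Int)))),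
    apply_ite (List.map (Prod.snd (α := Nat) (β := Int × Int × Int))), List.map_cons, List.map_nil,
    hF0, hF1, hF2, hF3, hF4, hF5, hF6, hF7]

theorem step_eq (bits vs vm vl : Int) (q : List String) (fails : List (List String)) :
    (ksunpack bits).foldl (fun fl k =>
        if vs == 1 - k.1 && vm == 1 - k.2.1 && vl == 1 - k.2.2 then fl ++ [q] else fl) fails
    = if (vs == 0 || vs == 1) && (vm == 0 || vm == 1) && (vl == 0 || vl == 1) then
        (if PySem.Int.band (bits >>> ((1 - vs) * 4 + (1 - vm) * 2 + (1 - vl)).toNat) 1 == 1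
         then fails ++ [q] else fails)
      else fails := by
  rw [ksunpack_eq, PySem.List.foldl_append_if, List.filter_map, List.filter_filter]
  have ht0 : Int.toNat 0 = 0 := rfl
  have ht1 : Int.toNat 1 = 1 := rfl
  have ht2 : Int.toNat 2 = 2 := rfl
  have ht3 : Int.toNat 3 = 3 := rfl
  have ht4 : Int.toNat 4 = 4 := rfl
  have ht5 : Int.toNat 5 = 5 := rfl
  have ht6 : Int.toNat 6 = 6 := rfl
  have ht7 : Int.toNat 7 = 7 := rfl
  by_cases h1 : vs = 0 ∨ vs = 1
  · by_cases h2 : vm = 0 ∨ vm = 1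
    · by_cases h3 : vl = 0 ∨ vl = 1
      · rcases h1 with h1 | h1 <;> rcases h2 with h2 | h2 <;> rcases h3 with h3 | h3 <;>
          subst h1 <;> subst h2 <;> subst h3 <;>
          norm_num [ksPairs, List.filter_cons, List.filter_nil,
            apply_ite (List.map (Prod.snd (α := Nat) (β := Int × Int × Int))), apply_ite (fails ++ ·),
            ht0, ht1, ht2, ht3, ht4, ht5, ht6, ht7, ← Int.shiftRight_natCast_right, Nat.cast_ofNat] <;>
          (split_ifs <;> first | rfl | simp_all)
      · push_neg at h3
        norm_num [ksPairs, List.filter_cons, List.filter_nil, h3.1, h3.2]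
    · push_neg at h2
      norm_num [ksPairs, List.filter_cons, List.filter_nil, h2.1, h2.2]
  · push_neg at h1
    norm_num [ksPairs, List.filter_cons, List.filter_nil, h1.1, h1.2]

-- ===== VERDICT (by name: the statement is the Claim_ definition above) =====
theorem check_cert_spec : Claim_equal_check_cert := by
  intro cert plist _hd hpre
  unfold Spec_check_cert check_cert check_cert_alt
  apply PySem.List.foldl_congr_mem
  intro acc x hx
  obtain ⟨hlen, hmem⟩ := hpre x hx
  match x, hlen with
  | (⟨[s, m, l], v⟩ : List String × Int), _ =>
    simpa using step_eq ((List.lookup [s,m,l] plist).getD 0)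
      ((List.lookup s cert).getD 0) ((List.lookup m cert).getD 0) ((List.lookup l cert).getD 0)
      [s, m, l] acc
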